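-- pv_equiv track=rewrite | github.com/AP-MI-2021/lab-2-MarianMutu | main.py | get_base_16
-- ===== SOURCE A (Python) =====
-- def get_base_16(n):
--     """calculam clase de resturi modulo 16"""
--
--     power2 = 1
--     base10 = 0
--     while n > 0:
--         base10 = n % 10 * power2 + base10
--         power2 = power2 * 2
--         n = n // 10
--     return base10
-- ===== SOURCE B (Python) =====
-- def get_base_16(n):
--     """calculam clase de resturi modulo 16"""
--     if n <= 0:
--         return 0
--     return 2 * get_base_16(n // 10) + n % 10
-- ===== Notes on version B (the rewrite author's own statement) =====
-- stated objective: simpler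
-- what changed: Replaces the iterative loop with its two accumulators (power2, base10) by a direct Horner-style recursion on the quotient, eliminating the explicit power-of-two variable.
import Mathlib
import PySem

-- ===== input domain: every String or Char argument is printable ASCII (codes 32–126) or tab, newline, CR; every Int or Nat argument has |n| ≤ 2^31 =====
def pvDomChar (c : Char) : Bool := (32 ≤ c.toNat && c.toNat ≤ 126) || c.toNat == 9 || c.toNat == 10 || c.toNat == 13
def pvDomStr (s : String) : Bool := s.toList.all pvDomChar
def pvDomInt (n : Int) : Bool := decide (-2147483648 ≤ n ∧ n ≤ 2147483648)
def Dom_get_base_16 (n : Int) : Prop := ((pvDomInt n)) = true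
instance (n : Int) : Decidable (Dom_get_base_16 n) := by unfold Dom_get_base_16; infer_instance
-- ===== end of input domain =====

-- B replaces A's while-loop with two accumulators (power2, base10) by a direct Horner
-- recursion on n // 10, with no power-of-two variable: objective 'simpler'.

-- ===== PORT A =====
-- the while loop of A, with its two accumulators
def pvALoop (n power2 base10 : Int) : Int :=
  if 0 < n then
    pvALoop (PySem.Int.floordiv n 10) (power2 * 2) (PySem.Int.mod n 10 * power2 + base10)
  else base10
termination_by n.toNat
decreasing_by
  simp only [PySem.Int.floordiv_eq_ediv_of_pos (a := n) (by norm_num : (0:Int) < 10)]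
  omega

def get_base_16 (n : Int) : Int := pvALoop n 1 0

-- ===== PORT B =====
def get_base_16_alt (n : Int) : Int :=
  if n ≤ 0 then 0
  else 2 * get_base_16_alt (PySem.Int.floordiv n 10) + PySem.Int.mod n 10
termination_by n.toNat
decreasing_by
  simp only [PySem.Int.floordiv_eq_ediv_of_pos (a := n) (by norm_num : (0:Int) < 10)]
  omega

-- ===== PRECONDITION & SPEC =====
def Spec_get_base_16 (n : Int) (out : Int) : Prop := out = get_base_16_alt n
instance (n : Int) (out : Int) : Decidable (Spec_get_base_16 n out) := by unfold Spec_get_base_16; infer_instance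

-- ===== CLAIM (what is proved, stated in full; the proofs are below) =====
def Claim_equal_get_base_16 : Prop := ∀ (n : Int), Dom_get_base_16 n → Spec_get_base_16 n (get_base_16 n)

-- ===== LEMMAS AND PROOFS =====
theorem pvALoop_eq_alt (k : Nat) : ∀ (n power2 base10 : Int), n.toNat ≤ k →
    pvALoop n power2 base10 = base10 + power2 * get_base_16_alt n := by
  induction k with
  | zero =>
    intro n p b h
    have hn : n ≤ 0 := by omega
    rw [pvALoop, get_base_16_alt]
    simp [hn, not_lt.mpr hn]
  | succ k ih =>
    intro n p b h
    by_cases hn : 0 < n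
    · rw [pvALoop, get_base_16_alt]
      simp only [hn, if_pos, not_le.mpr hn, if_false]
      rw [ih]
      · ring
      · rw [PySem.Int.floordiv_eq_ediv_of_pos (by norm_num : (0:Int) < 10)]
        omega
    · rw [pvALoop, get_base_16_alt]
      simp [hn, not_lt.mp hn]

-- ===== VERDICT (by name: the statement is the Claim_ definition above) =====
theorem get_base_16_spec : Claim_equal_get_base_16 := by
  intro n _
  unfold Spec_get_base_16 get_base_16
  rw [pvALoop_eq_alt n.toNat n 1 0 le_rfl]
  ring
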